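-- pv_equiv track=rewrite | github.com/xqyn/sequencing | belt_function.py | reorder_reads
-- ===== SOURCE A (Python) =====
-- from typing import List, Tuple, Optional, NamedTuple, Union
--
-- def reorder_reads(data: List[str],
--                   seq_list: List[str]) -> Tuple[List[str], List[str]]:
--     """
--     Reorder BAM read names and sequences based on predefined order.
--
--     Args:
--         data: List of read names.
--         seq_list: List of corresponding sequences.
--
--     Returns:
--         Tuple of (reordered names, reordered sequences).
--     """
--     # Check if all elements in data start with 'ref', 'read1_', or 'read2_' and have valid suffixes
--     valid_suffixes = ['start', 'inbetween', 'end', 'None']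
--     all_valid = all(
--         x.startswith(('ref', 'read1_', 'read2_')) and
--         (x == 'ref' or x.split('_')[1] in valid_suffixes)
--         for x in data
--     )
--
--     if not all_valid:
--         return data, seq_list
--
--     ref = [x for x in data if x == 'ref']
--     read1 = sorted([x for x in data if x.startswith('read1_')],
--                   key=lambda x: valid_suffixes.index(x.split('_')[1]))
--     read2 = sorted([x for x in data if x.startswith('read2_')],
--                   key=lambda x: valid_suffixes.index(x.split('_')[1]))
--     reordered_data = ref + read1 + read2
--
--     # Get indices of reordered data in original data
--     indices = [data.index(x) for x in reordered_data]
--     # Reorder seq_list using the same indices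
--     reordered_seq = [seq_list[i] for i in indices]
--
--     return reordered_data, reordered_seq
-- ===== SOURCE B (Python) =====
-- from typing import List, Tuple
--
-- _SUFFIXES = ('start', 'inbetween', 'end', 'None')
--
-- def reorder_reads(data: List[str],
--                   seq_list: List[str]) -> Tuple[List[str], List[str]]:
--     """Template-scan reimplementation: no sorting, no repeated data.index."""
--     # Validation (same rule, early return on the first offender).
--     for x in data:
--         if not (x.startswith(('ref', 'read1_', 'read2_'))
--                 and (x == 'ref' or x.split('_')[1] in _SUFFIXES)):
--             return data, seq_list
--
--     # First-occurrence index of every name, built in one pass.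
--     first = {}
--     for i, x in enumerate(data):
--         if x not in first:
--             first[x] = i
--
--     # Fixed order template: 'ref', then read1_ buckets, then read2_ buckets,
--     # each bucket keeping the original order (== stable sort by suffix rank).
--     reordered = [x for x in data if x == 'ref']
--     for pre in ('read1_', 'read2_'):
--         for s in _SUFFIXES:
--             reordered += [x for x in data
--                           if x.startswith(pre) and x.split('_')[1] == s]
--
--     return reordered, [seq_list[first[x]] for x in reordered]
-- ===== Notes on version B (the rewrite author's own statement) =====
-- stated objective: alternative
-- what changed: Replaces the partition-plus-two-stable-sorts and the per-element data.index scans with a fixed order template ('ref', then read1_/read2_ crossed with the four suffixes) traversed bucket by bucket, plus a first-occurrence dictionary built in one pass for the sequence lookup.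
import Mathlib
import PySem

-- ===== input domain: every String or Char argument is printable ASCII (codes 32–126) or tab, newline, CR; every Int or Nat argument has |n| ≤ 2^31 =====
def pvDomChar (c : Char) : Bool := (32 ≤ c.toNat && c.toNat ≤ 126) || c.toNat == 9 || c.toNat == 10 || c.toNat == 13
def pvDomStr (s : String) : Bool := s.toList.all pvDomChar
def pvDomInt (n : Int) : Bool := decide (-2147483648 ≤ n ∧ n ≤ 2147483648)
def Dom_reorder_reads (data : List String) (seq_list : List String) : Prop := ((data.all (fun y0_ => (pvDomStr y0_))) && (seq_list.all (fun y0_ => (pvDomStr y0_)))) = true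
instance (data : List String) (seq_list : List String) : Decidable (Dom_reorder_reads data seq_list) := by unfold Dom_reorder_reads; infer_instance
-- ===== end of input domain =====

-- B replaces A's two stable sorts and repeated data.index scans by a fixed bucket
-- template plus a first-occurrence dictionary (objective: alternative decomposition).

-- ===== PORT A =====

def pvValidSuffixes : List String := ["start", "inbetween", "end", "None"]

-- x.split('_')  (sep "_" ≠ "", so split? is always some: exact)
def pvSplitU (x : String) : List String := (PySem.Str.split? x "_").getD []

-- x.split('_')[1]; the default "" is only reached where Python A raises IndexError (excluded by Pre_)
def pvSfx (x : String) : String := PySem.List.pyGetD (pvSplitU x) 1 ""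

def pvStartsOK (x : String) : Bool :=
  PySem.Str.startswith x "ref" || PySem.Str.startswith x "read1_" || PySem.Str.startswith x "read2_"

def pvValidA (x : String) : Bool :=
  pvStartsOK x && (x == "ref" || pvValidSuffixes.contains (pvSfx x))

-- valid_suffixes.index(x.split('_')[1]); on sorted elements validation guarantees 'some'
def pvKeyA (x : String) : Nat := (PySem.List.index? pvValidSuffixes (pvSfx x)).getD 0

def reorder_reads (data : List String) (seq_list : List String) : List String × List String :=
  let all_valid := data.all pvValidA
  if !all_valid then (data, seq_list)
  else
    let ref := data.filter (fun x => x == "ref")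
    let read1 := PySem.List.sorted (data.filter (fun x => PySem.Str.startswith x "read1_")) pvKeyA false
    let read2 := PySem.List.sorted (data.filter (fun x => PySem.Str.startswith x "read2_")) pvKeyA false
    let reordered_data := ref ++ read1 ++ read2
    -- data.index(x): always found (x ∈ data); seq_list[i]: in range under Pre_, "" default otherwise
    let indices := reordered_data.map (fun x => (((PySem.List.index? data x).getD 0 : Nat) : Int))
    let reordered_seq := indices.map (fun i => PySem.List.pyGetD seq_list i "")
    (reordered_data, reordered_seq)

-- ===== PORT B =====

def pvSuffB : List String := ["start", "inbetween", "end", "None"]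

-- the validation test of Source B's first loop (one element)
def pvOkB (x : String) : Bool :=
  (PySem.Str.startswith x "ref" || PySem.Str.startswith x "read1_" || PySem.Str.startswith x "read2_")
  && (x == "ref" || pvSuffB.contains (PySem.List.pyGetD ((PySem.Str.split? x "_").getD []) 1 ""))

-- first = {}; for i, x in enumerate(data): if x not in first: first[x] = i
def pvFirstDict (data : List String) : PySem.Dict String Int :=
  (PySem.List.enumerate data 0).foldl
    (fun d p => if d.contains p.2 then d else d.insert p.2 p.1) PySem.Dict.empty

def reorder_reads_alt (data : List String) (seq_list : List String) : List String × List String :=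
  if data.all pvOkB then
    let first := pvFirstDict data
    let reordered :=
      ["read1_", "read2_"].foldl (fun acc pre =>
        pvSuffB.foldl (fun acc s =>
          acc ++ data.filter (fun x =>
            PySem.Str.startswith x pre
            && PySem.List.pyGetD ((PySem.Str.split? x "_").getD []) 1 "" == s)) acc)
        (data.filter (fun x => x == "ref"))
    -- first[x]: always present (x ∈ data); seq_list[...]: in range under Pre_, "" default otherwise
    (reordered, reordered.map (fun x => PySem.List.pyGetD seq_list (first.getD x 0) ""))
  else (data, seq_list)

-- ===== PRECONDITION & SPEC =====

-- Pre_'s own copies of the shape tests (closed-form, independent of the ports)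
def pvValidP (x : String) : Bool :=
  (PySem.Str.startswith x "ref" || PySem.Str.startswith x "read1_" || PySem.Str.startswith x "read2_")
  && (x == "ref" || ["start", "inbetween", "end", "None"].contains
        (PySem.List.pyGetD ((PySem.Str.split? x "_").getD []) 1 ""))

-- a name on which evaluating A's validity test raises (x.split('_')[1] IndexError)
def pvRaiserP (x : String) : Bool :=
  (PySem.Str.startswith x "ref" || PySem.Str.startswith x "read1_" || PySem.Str.startswith x "read2_")
  && !(x == "ref") && decide (((PySem.Str.split? x "_").getD []).length < 2)

-- a name whose first-occurrence index is looked up in seq_list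
def pvUsedP (x : String) : Bool :=
  x == "ref" || PySem.Str.startswith x "read1_" || PySem.Str.startswith x "read2_"

-- A raises IndexError when the first invalid name (validation short-circuits there) has no '_'
-- after a 'ref'/'read1_'/'read2_' start, and when (all names valid) a used name's first index
-- is out of range of seq_list; Pre_ excludes exactly those inputs.
def Pre_reorder_reads (data : List String) (seq_list : List String) : Prop :=
  pvRaiserP ((data.dropWhile pvValidP).headD "") = false
  ∧ ((∀ x ∈ data, pvValidP x = true) →
      ∀ x ∈ data, pvUsedP x = true → List.idxOf x data < seq_list.length)

instance (data : List String) (seq_list : List String) : Decidable (Pre_reorder_reads data seq_list) := by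
  unfold Pre_reorder_reads; infer_instance

def pvWitness_reorder_reads : List String × List String :=
  (["read2_None", "ref", "read1_end", "read1_start"], ["A", "C", "G", "T"])

def Spec_reorder_reads (data : List String) (seq_list : List String) (out : List String × List String) : Prop := out = reorder_reads_alt data seq_list
instance (data : List String) (seq_list : List String) (out : List String × List String) : Decidable (Spec_reorder_reads data seq_list out) := by unfold Spec_reorder_reads; infer_instance

-- ===== CLAIM (what is proved, stated in full; the proofs are below) =====
def Claim_equal_reorder_reads : Prop := ∀ (data : List String) (seq_list : List String), Dom_reorder_reads data seq_list → Pre_reorder_reads data seq_list → Spec_reorder_reads data seq_list (reorder_reads data seq_list)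

-- ===== LEMMAS AND PROOFS =====

-- the two validity tests are the same predicate
theorem pvOkB_eq_validA : pvOkB = pvValidA := rfl

-- === first-occurrence dictionary ===

theorem pvFirstDict_preserve (t : List String) (s : Int) (d : PySem.Dict String Int)
    (x : String) (v : Int) (h : d.get? x = some v) :
    ((PySem.List.enumerate t s).foldl
      (fun d p => if d.contains p.2 then d else d.insert p.2 p.1) d).get? x = some v := by
  induction t generalizing s d with
  | nil => simpa [PySem.List.enumerate] using h
  | cons y t ih =>
    rw [PySem.List.enumerate_cons]
    simp only [List.foldl_cons]
    by_cases hc : d.contains y = true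
    · simp [hc]; exact ih _ _ h
    · simp [hc]
      apply ih
      by_cases hxy : x = y
      · subst hxy
        rw [PySem.Dict.contains_eq_isSome_get?, h] at hc
        simp at hc
      · rw [PySem.Dict.get?_insert_of_ne _ _ hxy]; exact h

theorem pvFirstDict_aux (t : List String) (s : Int) (d : PySem.Dict String Int)
    (x : String) (hx : x ∈ t) (hd : d.contains x = false) :
    ((PySem.List.enumerate t s).foldl
      (fun d p => if d.contains p.2 then d else d.insert p.2 p.1) d).get? x
      = some (s + (List.idxOf x t : Int)) := by
  induction t generalizing s d with
  | nil => simp at hx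
  | cons y t ih =>
    rw [PySem.List.enumerate_cons]
    simp only [List.foldl_cons]
    by_cases hxy : x = y
    · subst hxy
      rw [if_neg (by simp [hd])]
      rw [List.idxOf_cons_self]
      simpa using pvFirstDict_preserve t (s + 1) _ x s (PySem.Dict.get?_insert_self d x s)
    · have hxt : x ∈ t := by
        rcases List.mem_cons.mp hx with h | h
        · exact absurd h hxy
        · exact h
      have hidx : List.idxOf x (y :: t) = List.idxOf x t + 1 := by
        simpa using List.idxOf_cons_ne t (by simpa using (Ne.symm hxy))
      by_cases hc : d.contains y = true
      · simp only [hc, if_true]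
        rw [ih _ _ hxt hd, hidx]
        push_cast; ring_nf
      · rw [if_neg hc]
        have hd' : (d.insert y s).contains x = false := by
          rw [PySem.Dict.contains_insert]
          simp [hxy, hd]
        rw [ih _ _ hxt hd', hidx]
        push_cast; ring_nf

theorem pvFirstDict_getD (data : List String) (x : String) (hx : x ∈ data) :
    (pvFirstDict data).getD x 0 = (List.idxOf x data : Int) := by
  unfold pvFirstDict
  rw [PySem.Dict.getD_eq_get?_getD,
      pvFirstDict_aux data 0 PySem.Dict.empty x hx (by simp [pysem])]
  simp

-- === stable sort by a {0,1,2,3}-valued key is bucket concatenation ===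

theorem insertBy_all_before {key : String → Nat} (x : String) (r : List String)
    (h : ∀ y ∈ r, key x < key y) :
    PySem.List.insertBy (fun a b => decide (key a < key b)) x r = x :: r := by
  cases r with
  | nil => rfl
  | cons y t =>
    have : key x < key y := h y (by simp)
    simp [PySem.List.insertBy, this]

theorem insertBy_append_nb {α : Type} (before : α → α → Bool) (x : α) (l r : List α)
    (h : ∀ y ∈ l, before x y = false) :
    PySem.List.insertBy before x (l ++ r) = l ++ PySem.List.insertBy before x r := by
  induction l with
  | nil => simp
  | cons y t ih =>
    have hy := h y (by simp)
    simp only [List.cons_append, PySem.List.insertBy, hy, Bool.false_eq_true, if_false]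
    rw [ih (fun z hz => h z (by simp [hz]))]

theorem foldl_insertBy_buckets (key : String → Nat) (xs : List String) :
    ∀ (a0 a1 a2 a3 : List String),
    (∀ y ∈ a0, key y = 0) → (∀ y ∈ a1, key y = 1) →
    (∀ y ∈ a2, key y = 2) → (∀ y ∈ a3, key y = 3) →
    (∀ x ∈ xs, key x < 4) →
    xs.foldl (fun acc x => PySem.List.insertBy (fun a b => decide (key a < key b)) x acc)
      (a0 ++ a1 ++ a2 ++ a3)
    = (a0 ++ xs.filter (fun x => key x == 0)) ++ (a1 ++ xs.filter (fun x => key x == 1))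
      ++ (a2 ++ xs.filter (fun x => key x == 2)) ++ (a3 ++ xs.filter (fun x => key x == 3)) := by
  induction xs with
  | nil => intro a0 a1 a2 a3 _ _ _ _ _; simp
  | cons x t ih =>
    intro a0 a1 a2 a3 h0 h1 h2 h3 hlt
    have hx : key x < 4 := hlt x (by simp)
    have htlt : ∀ y ∈ t, key y < 4 := fun y hy => hlt y (by simp [hy])
    simp only [List.foldl_cons]
    interval_cases hk : key x
    · have hins : PySem.List.insertBy (fun a b => decide (key a < key b)) x (a0 ++ a1 ++ a2 ++ a3)
          = (a0 ++ [x]) ++ a1 ++ a2 ++ a3 := by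
        rw [show a0 ++ a1 ++ a2 ++ a3 = a0 ++ (a1 ++ a2 ++ a3) by simp]
        rw [insertBy_append_nb _ _ _ _ (fun y hy => by simp [h0 y hy, hk])]
        rw [insertBy_all_before x _ (fun y hy => by
          simp only [List.mem_append] at hy
          rcases hy with (hy | hy) | hy
          · simp [h1 y hy, hk]
          · simp [h2 y hy, hk]
          · simp [h3 y hy, hk])]
        simp
      rw [hins, ih (a0 ++ [x]) a1 a2 a3
            (fun y hy => by rcases List.mem_append.mp hy with hy | hy
                            · exact h0 y hy
                            · simp at hy; simp [hy, hk]) h1 h2 h3 htlt]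
      simp [hk]
    · have hins : PySem.List.insertBy (fun a b => decide (key a < key b)) x (a0 ++ a1 ++ a2 ++ a3)
          = a0 ++ (a1 ++ [x]) ++ a2 ++ a3 := by
        rw [show a0 ++ a1 ++ a2 ++ a3 = (a0 ++ a1) ++ (a2 ++ a3) by simp]
        rw [insertBy_append_nb _ _ _ _ (fun y hy => by
          simp only [List.mem_append] at hy
          rcases hy with hy | hy
          · simp [h0 y hy, hk]
          · simp [h1 y hy, hk])]
        rw [insertBy_all_before x _ (fun y hy => by
          simp only [List.mem_append] at hy
          rcases hy with hy | hy
          · simp [h2 y hy, hk]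
          · simp [h3 y hy, hk])]
        simp
      rw [hins, ih a0 (a1 ++ [x]) a2 a3 h0
            (fun y hy => by rcases List.mem_append.mp hy with hy | hy
                            · exact h1 y hy
                            · simp at hy; simp [hy, hk]) h2 h3 htlt]
      simp [hk]
    · have hins : PySem.List.insertBy (fun a b => decide (key a < key b)) x (a0 ++ a1 ++ a2 ++ a3)
          = a0 ++ a1 ++ (a2 ++ [x]) ++ a3 := by
        rw [show a0 ++ a1 ++ a2 ++ a3 = (a0 ++ a1 ++ a2) ++ a3 by simp]
        rw [insertBy_append_nb _ _ _ _ (fun y hy => by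
          simp only [List.mem_append] at hy
          rcases hy with (hy | hy) | hy
          · simp [h0 y hy, hk]
          · simp [h1 y hy, hk]
          · simp [h2 y hy, hk])]
        rw [insertBy_all_before x _ (fun y hy => by simp [h3 y hy, hk])]
        simp
      rw [hins, ih a0 a1 (a2 ++ [x]) a3 h0 h1
            (fun y hy => by rcases List.mem_append.mp hy with hy | hy
                            · exact h2 y hy
                            · simp at hy; simp [hy, hk]) h3 htlt]
      simp [hk]
    · have hins : PySem.List.insertBy (fun a b => decide (key a < key b)) x (a0 ++ a1 ++ a2 ++ a3)
          = a0 ++ a1 ++ a2 ++ (a3 ++ [x]) := by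
        rw [show a0 ++ a1 ++ a2 ++ a3 = (a0 ++ a1 ++ a2 ++ a3) ++ ([] : List String) by simp]
        rw [insertBy_append_nb _ _ _ _ (fun y hy => by
          simp only [List.mem_append] at hy
          rcases hy with ((hy | hy) | hy) | hy
          · simp [h0 y hy, hk]
          · simp [h1 y hy, hk]
          · simp [h2 y hy, hk]
          · simp [h3 y hy, hk])]
        rw [insertBy_all_before x [] (by simp)]
        simp
      rw [hins, ih a0 a1 a2 (a3 ++ [x]) h0 h1 h2
            (fun y hy => by rcases List.mem_append.mp hy with hy | hy
                            · exact h3 y hy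
                            · simp at hy; simp [hy, hk]) htlt]
      simp [hk]

theorem sorted_buckets (key : String → Nat) (xs : List String)
    (h : ∀ x ∈ xs, key x < 4) :
    PySem.List.sorted xs key false
    = xs.filter (fun x => key x == 0) ++ xs.filter (fun x => key x == 1)
      ++ xs.filter (fun x => key x == 2) ++ xs.filter (fun x => key x == 3) := by
  rw [PySem.List.sorted_eq_foldl_insertBy]
  simpa using foldl_insertBy_buckets key xs [] [] [] []
    (by simp) (by simp) (by simp) (by simp) h

-- ===== VERDICT helper lemmas =====

theorem key_eq_iff (x : String) (hmem : pvValidSuffixes.contains (pvSfx x) = true)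
    (i : Nat) (hi : i < 4) :
    (pvKeyA x == i) = (pvSfx x == pvValidSuffixes[i]!) := by
  unfold pvKeyA
  have : pvSfx x = "start" ∨ pvSfx x = "inbetween" ∨ pvSfx x = "end" ∨ pvSfx x = "None" := by
    simpa [pvValidSuffixes] using hmem
  interval_cases i <;>
    rcases this with h | h | h | h <;> simp [h, pvValidSuffixes, PySem.List.index?] <;> decide

theorem idxOf?_of_mem (x : String) (data : List String) (h : x ∈ data) :
    List.idxOf? x data = some (List.idxOf x data) := by
  induction data with
  | nil => simp at h
  | cons y t ih =>
    by_cases hxy : x = y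
    · subst hxy; simp [List.idxOf?_cons, List.idxOf_cons_self]
    · rcases List.mem_cons.mp h with h' | h'
      · exact absurd h' hxy
      · simp [List.idxOf?_cons, Ne.symm hxy, ih h']

theorem valid_contains (x : String) (hv : pvValidA x = true) (href : (x == "ref") = false) :
    pvValidSuffixes.contains (pvSfx x) = true := by
  simp only [pvValidA, href, Bool.false_or, Bool.and_eq_true] at hv
  exact hv.2

theorem startswith_ne_ref (x pre : String) (href : PySem.Str.startswith "ref" pre = false)
    (hs : PySem.Str.startswith x pre = true) : (x == "ref") = false := by
  by_cases hx : x = "ref"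
  · subst hx; rw [href] at hs; exact absurd hs (by simp)
  · simp [hx]

theorem key_lt_four (data : List String) (hall : data.all pvValidA = true)
    (pre : String) (href : PySem.Str.startswith "ref" pre = false) :
    ∀ x ∈ data.filter (fun x => PySem.Str.startswith x pre), pvKeyA x < 4 := by
  intro x hx
  rcases List.mem_filter.mp hx with ⟨hxd, hs⟩
  have hmem := valid_contains x (by simpa using List.all_eq_true.mp hall x hxd)
      (startswith_ne_ref x pre href hs)
  have : pvSfx x = "start" ∨ pvSfx x = "inbetween" ∨ pvSfx x = "end" ∨ pvSfx x = "None" := by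
    simpa [pvValidSuffixes] using hmem
  unfold pvKeyA
  rcases this with h | h | h | h <;> simp [h, pvValidSuffixes, PySem.List.index?] <;> decide

theorem bucket_filter (data : List String) (hall : data.all pvValidA = true)
    (pre : String) (href : PySem.Str.startswith "ref" pre = false)
    (i : Nat) (hi : i < 4) (s : String) (hsi : pvValidSuffixes[i]! = s) :
    (data.filter (fun x => PySem.Str.startswith x pre)).filter (fun x => pvKeyA x == i)
    = data.filter (fun x => PySem.Str.startswith x pre
        && (PySem.List.pyGetD ((PySem.Str.split? x "_").getD []) 1 "" == s)) := by
  rw [List.filter_filter]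
  apply List.filter_congr
  intro x hxd
  by_cases hs : PySem.Str.startswith x pre = true
  · have hmem := valid_contains x (by simpa using List.all_eq_true.mp hall x hxd)
        (startswith_ne_ref x pre href hs)
    have hk := key_eq_iff x hmem i hi
    rw [hsi] at hk
    show (pvKeyA x == i && PySem.Str.startswith x pre)
        = (PySem.Str.startswith x pre && (pvSfx x == s))
    rw [hk, hs, Bool.and_true, Bool.true_and]
  · simp only [Bool.not_eq_true] at hs
    show (pvKeyA x == i && PySem.Str.startswith x pre)
        = (PySem.Str.startswith x pre && (pvSfx x == s))
    rw [hs, Bool.and_false, Bool.false_and]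

-- ===== VERDICT (by name: the statement is the Claim_ definition above) =====
theorem reorder_reads_spec : Claim_equal_reorder_reads := by
  intro data seq _ _
  unfold Spec_reorder_reads reorder_reads reorder_reads_alt
  rw [pvOkB_eq_validA]
  by_cases hall : data.all pvValidA = true
  · simp only [hall, Bool.not_true, Bool.false_eq_true, if_false, if_true]
    have h1 := sorted_buckets pvKeyA (data.filter (fun x => PySem.Str.startswith x "read1_"))
        (key_lt_four data hall "read1_" (by decide))
    have h2 := sorted_buckets pvKeyA (data.filter (fun x => PySem.Str.startswith x "read2_"))
        (key_lt_four data hall "read2_" (by decide))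
    rw [h1, h2,
        bucket_filter data hall "read1_" (by decide) 0 (by norm_num) "start" rfl,
        bucket_filter data hall "read1_" (by decide) 1 (by norm_num) "inbetween" rfl,
        bucket_filter data hall "read1_" (by decide) 2 (by norm_num) "end" rfl,
        bucket_filter data hall "read1_" (by decide) 3 (by norm_num) "None" rfl,
        bucket_filter data hall "read2_" (by decide) 0 (by norm_num) "start" rfl,
        bucket_filter data hall "read2_" (by decide) 1 (by norm_num) "inbetween" rfl,
        bucket_filter data hall "read2_" (by decide) 2 (by norm_num) "end" rfl,
        bucket_filter data hall "read2_" (by decide) 3 (by norm_num) "None" rfl]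
    simp only [pvSuffB, List.foldl_cons, List.foldl_nil]
    refine Prod.ext ?_ ?_
    · simp only [List.append_assoc]
    · simp only [List.map_map, List.append_assoc]
      apply List.map_congr_left
      intro x hx
      have hxd : x ∈ data := by
        simp only [List.mem_append, List.mem_filter] at hx
        rcases hx with h | h | h | h | h | h | h | h | h <;> exact h.1
      simp only [Function.comp]
      rw [pvFirstDict_getD data x hxd, PySem.List.index?_eq_idxOf?, idxOf?_of_mem x data hxd]
      simp
  · simp only [hall, Bool.not_false, if_true, Bool.false_eq_true, if_false]
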